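-- pv_equiv track=rewrite | github.com/AMR-KELEG/competitive-programming | Codeforces/952C.py | is_sort_correct
-- ===== SOURCE A (Python) =====
-- def is_sort_correct(n, a):
-- 	for _ in range(n):
-- 		# find argmax
-- 		max_indx = a.index(max(a))
-- 		if max_indx +1 != len(a):
-- 			if abs(a[max_indx] - a[max_indx+1]) >1:
-- 				return False
-- 		if max_indx != 0:
-- 			if abs(a[max_indx] - a[max_indx-1]) >1:
-- 				return False
-- 		a.pop(max_indx)
-- 	return True
-- ===== SOURCE B (Python) =====
-- def is_sort_correct(n, a):
--     # No simulation: when a maximum is removed successfully, its two neighbours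
--     # both lie within 1 of it (and below it), so the newly adjacent pair differs
--     # by at most 1 and can never fail later.  Hence the process fails iff some
--     # ORIGINALLY adjacent pair differs by more than 1 and the earlier-removed of
--     # the two (the larger value, ties to the left) is among the first n removals,
--     # i.e. its removal rank (number of higher-priority elements) is < n.
--     m = len(a)
--     for i in range(m - 1):
--         if abs(a[i] - a[i + 1]) > 1:
--             p = i if a[i] >= a[i + 1] else i + 1
--             rank = sum(1 for j in range(m) if a[j] > a[p] or (a[j] == a[p] and j < p))
--             if rank < n:
--                 return False
--     return True
-- ===== Notes on version B (the rewrite author's own statement) =====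
-- stated objective: faster
-- what changed: B does no removal simulation at all: it scans the originally adjacent pairs once and, for an uneven pair (|diff|>1), checks whether the earlier-removed endpoint's removal rank (count of higher-priority elements) is below n, using the invariant that pairs created by removing a maximum never differ by more than 1.
import Mathlib
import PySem

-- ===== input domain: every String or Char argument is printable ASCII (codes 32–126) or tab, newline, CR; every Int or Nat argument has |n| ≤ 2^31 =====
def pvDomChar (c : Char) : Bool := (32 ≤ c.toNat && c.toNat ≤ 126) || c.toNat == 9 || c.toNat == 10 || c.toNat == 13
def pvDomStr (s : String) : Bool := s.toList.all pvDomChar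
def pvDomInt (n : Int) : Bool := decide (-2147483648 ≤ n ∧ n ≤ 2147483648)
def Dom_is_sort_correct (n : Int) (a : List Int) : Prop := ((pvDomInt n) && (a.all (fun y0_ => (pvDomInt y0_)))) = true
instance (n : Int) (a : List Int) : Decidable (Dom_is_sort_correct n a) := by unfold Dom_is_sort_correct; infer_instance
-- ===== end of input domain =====

-- B replaces A's removal simulation by one scan over originally-adjacent pairs with a rank test;
-- equivalence is about the RETURN value only: Python A empties the caller's list in place, B does not mutate it.


-- ===== PORT A =====
-- one iteration of A's `for _ in range(n)` loop, fuel = remaining iterations;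
-- the `none` branches (false) are where Python raises (empty list / unreachable), excluded by Pre_.
def pvAloop : Nat → List Int → Bool
  | 0, _ => true
  | k+1, a =>
    match PySem.List.max? a (fun x => x) with
    | none => false          -- Python: ValueError from max([])
    | some mx =>
      match PySem.List.index? a mx with
      | none => false        -- unreachable: mx ∈ a
      | some p =>
        if (p:Int) + 1 ≠ (a.length : Int) ∧
           1 < |PySem.List.pyGetD a (p:Int) 0 - PySem.List.pyGetD a ((p:Int)+1) 0| then false
        else if (p:Int) ≠ 0 ∧
           1 < |PySem.List.pyGetD a (p:Int) 0 - PySem.List.pyGetD a ((p:Int)-1) 0| then false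
        else
          match PySem.List.pop? a (p:Int) with
          | none => false    -- unreachable: p in range
          | some (_, a') => pvAloop k a'

def is_sort_correct (n : Int) (a : List Int) : Bool := pvAloop n.toNat a

-- ===== PORT B =====
-- rank = sum(1 for j in range(m) if a[j] > a[p] or (a[j] == a[p] and j < p))
def pvRank (a : List Int) (p : Int) : Int :=
  (PySem.List.pyRange 0 (a.length : Int) 1).foldl
    (fun acc j =>
      if PySem.List.pyGetD a p 0 < PySem.List.pyGetD a j 0 ∨
         (PySem.List.pyGetD a j 0 = PySem.List.pyGetD a p 0 ∧ j < p) then acc + 1 else acc) 0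

-- the `for i in range(m-1)` loop with its early `return False`
def pvBloop (n : Int) (a : List Int) : List Int → Bool
  | [] => true
  | i :: rest =>
    if 1 < |PySem.List.pyGetD a i 0 - PySem.List.pyGetD a (i+1) 0| then
      let p := if PySem.List.pyGetD a (i+1) 0 ≤ PySem.List.pyGetD a i 0 then i else i + 1
      if pvRank a p < n then false else pvBloop n a rest
    else pvBloop n a rest

def is_sort_correct_alt (n : Int) (a : List Int) : Bool :=
  pvBloop n a (PySem.List.pyRange 0 ((a.length : Int) - 1) 1)

-- ===== PRECONDITION & SPEC =====
-- Pre_ excludes exactly the inputs where A raises ValueError (max() of an emptied list):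
-- n > len(a) while every adjacent pair differs by at most 1, so the scan never aborts early.
def Pre_is_sort_correct (n : Int) (a : List Int) : Prop :=
  n ≤ (a.length : Int) ∨ ¬ a.IsChain (fun x y => |x - y| ≤ 1)
instance (n : Int) (a : List Int) : Decidable (Pre_is_sort_correct n a) := by
  unfold Pre_is_sort_correct; infer_instance
def pvWitness_is_sort_correct : Int × List Int := (2, [3, 4, 5])

def Spec_is_sort_correct (n : Int) (a : List Int) (out : Bool) : Prop := out = is_sort_correct_alt n a
instance (n : Int) (a : List Int) (out : Bool) : Decidable (Spec_is_sort_correct n a out) := by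
  unfold Spec_is_sort_correct; infer_instance

-- ===== CLAIM (what is proved, stated in full; the proofs are below) =====
def Claim_equal_is_sort_correct : Prop := ∀ (n : Int) (a : List Int), Dom_is_sort_correct n a → Pre_is_sort_correct n a → Spec_is_sort_correct n a (is_sort_correct n a)

-- ===== LEMMAS AND PROOFS =====

-- removal rank of the earlier-removed endpoint of the adjacent pair (x, y) sitting between L and R
def pvPr (L : List Int) (x y : Int) (R : List Int) : Int :=
  if y ≤ x then ((L.countP (fun e => x ≤ e)) : Int) + (((y :: R).countP (fun e => x < e)) : Int)
  else (((L ++ [x]).countP (fun e => y ≤ e)) : Int) + ((R.countP (fun e => y < e)) : Int)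

-- the common characterization: every originally-adjacent uneven pair survives the first k removals
def pvPc (k : Int) (a : List Int) : Prop :=
  ∀ L x y R, a = L ++ x :: y :: R → 1 < |x - y| → k ≤ pvPr L x y R

theorem pvPr_nonneg (L : List Int) (x y : Int) (R : List Int) : 0 ≤ pvPr L x y R := by
  unfold pvPr; split <;> positivity

theorem pvPc_toNat (n : Int) (a : List Int) : pvPc ((n.toNat : Int)) a ↔ pvPc n a := by
  constructor <;> intro h L x y R hd hb <;> have := h L x y R hd hb <;>
    have := pvPr_nonneg L x y R <;> omega


theorem pv_enum_fst_bound {xs : List Int} {s : Int} {pr : Int × Int}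
    (h : pr ∈ PySem.List.enumerate xs s) : s ≤ pr.1 ∧ pr.1 < s + xs.length := by
  have hm : pr.1 ∈ (PySem.List.enumerate xs s).map (fun x => x.1) := List.mem_map_of_mem h
  rw [PySem.List.map_fst_enumerate] at hm
  exact PySem.List.mem_pyRange_one.mp hm

theorem pv_countP_enum (xs : List Int) (s : Int) (q : Int → Bool) (p' : Int × Int → Bool)
    (h : ∀ pr ∈ PySem.List.enumerate xs s, p' pr = q pr.2) :
    (PySem.List.enumerate xs s).countP p' = xs.countP q := by
  have h1 : (PySem.List.enumerate xs s).countP p'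
      = (PySem.List.enumerate xs s).countP (fun pr => q pr.2) :=
    List.countP_congr (fun x hx => by rw [h x hx])
  rw [h1]
  have h2 : (fun pr : Int × Int => q pr.2) = (q ∘ (fun pr : Int × Int => pr.2)) := rfl
  rw [h2, ← List.countP_map, PySem.List.map_snd_enumerate]

theorem pv_getD_append (L R : List Int) (v d : Int) :
    PySem.List.pyGetD (L ++ v :: R) ((L.length : Nat) : Int) d = v := by
  rw [PySem.List.pyGetD_natCast]
  have h : (L ++ v :: R)[L.length]? = some v := by
    rw [List.getElem?_append_right (Nat.le_refl _)]
    simp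
  simp [List.getD_eq_getElem?_getD]

theorem pvRank_dec (L R : List Int) (v : Int) :
    pvRank (L ++ v :: R) ((L.length : Nat) : Int) =
      ((L.countP (fun e => decide (v ≤ e))) : Int) + ((R.countP (fun e => decide (v < e))) : Int) := by
  unfold pvRank
  rw [PySem.List.foldl_ite_add_one]
  simp only [pv_getD_append, zero_add]
  have hmap := PySem.List.enumerate_eq_map_pyRange (L ++ v :: R) 0
  simp only [PySem.List.len_eq] at hmap
  have hfun : (fun j : Int => decide (v < PySem.List.pyGetD (L ++ v :: R) j 0 ∨
        (PySem.List.pyGetD (L ++ v :: R) j 0 = v ∧ j < ((L.length : Nat) : Int))))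
      = ((fun pr : Int × Int => decide (v < pr.2 ∨ (pr.2 = v ∧ pr.1 < ((L.length : Nat) : Int)))) ∘
         (fun j : Int => (j, PySem.List.pyGetD (L ++ v :: R) j 0))) := rfl
  rw [hfun, ← List.countP_map, ← hmap]
  rw [PySem.List.enumerate_append, PySem.List.enumerate_cons]
  rw [List.countP_append, List.countP_cons]
  have c1 : (PySem.List.enumerate L 0).countP
      (fun pr : Int × Int => decide (v < pr.2 ∨ (pr.2 = v ∧ pr.1 < ((L.length : Nat) : Int))))
      = L.countP (fun e => decide (v ≤ e)) := by
    apply pv_countP_enum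
    intro pr hpr
    have hb := pv_enum_fst_bound hpr
    simp only [decide_eq_decide]
    constructor
    · rintro (h | ⟨h, _⟩) <;> omega
    · intro h
      rcases lt_or_eq_of_le h with h' | h'
      · exact Or.inl h'
      · exact Or.inr ⟨h'.symm, by omega⟩
  have c2 : decide (v < v ∨ (v = v ∧ (0 + (L.length : Int)) < ((L.length : Nat) : Int))) = false := by
    simp
  have c3 : (PySem.List.enumerate R (0 + (L.length : Int) + 1)).countP
      (fun pr : Int × Int => decide (v < pr.2 ∨ (pr.2 = v ∧ pr.1 < ((L.length : Nat) : Int))))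
      = R.countP (fun e => decide (v < e)) := by
    apply pv_countP_enum
    intro pr hpr
    have hb := pv_enum_fst_bound hpr
    simp only [decide_eq_decide]
    constructor
    · rintro (h | ⟨h, hj⟩)
      · exact h
      · omega
    · exact Or.inl
  rw [c1, c2, c3]
  push_cast
  ring

theorem pvBloop_iff (n : Int) (a : List Int) (js : List Int) :
    pvBloop n a js = true ↔ ∀ i ∈ js,
      (1 < |PySem.List.pyGetD a i 0 - PySem.List.pyGetD a (i+1) 0| →
        n ≤ pvRank a (if PySem.List.pyGetD a (i+1) 0 ≤ PySem.List.pyGetD a i 0 then i else i + 1)) := by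
  induction js with
  | nil => simp [pvBloop]
  | cons i rest ih =>
    unfold pvBloop
    by_cases hbad : 1 < |PySem.List.pyGetD a i 0 - PySem.List.pyGetD a (i+1) 0|
    · simp only [hbad, if_true]
      by_cases hr : pvRank a (if PySem.List.pyGetD a (i+1) 0 ≤ PySem.List.pyGetD a i 0 then i else i + 1) < n
      · simp only [hr, if_true]
        constructor
        · intro h; exact absurd h (by simp)
        · intro h
          have := h i (by simp) hbad
          omega
      · simp only [hr, if_false]
        rw [ih]
        constructor
        · intro h j hj
          rcases List.mem_cons.mp hj with rfl | hj'
          · intro _; omega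
          · exact h j hj'
        · intro h j hj
          exact h j (List.mem_cons_of_mem _ hj)
    · simp only [hbad, if_false]
      rw [ih]
      constructor
      · intro h j hj
        rcases List.mem_cons.mp hj with rfl | hj'
        · intro hc; exact absurd hc hbad
        · exact h j hj'
      · intro h j hj
        exact h j (List.mem_cons_of_mem _ hj)

theorem pv_decomp (a : List Int) (k : Nat) (h : k + 1 < a.length) :
    a = a.take k ++ a[k] :: a[k+1] :: a.drop (k+2) := by
  conv_lhs => rw [← List.take_append_drop k a]
  congr 1
  rw [List.drop_eq_getElem_cons (by omega)]
  congr 1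
  rw [show k + 1 + 1 = k + 2 from rfl] at *
  rw [List.drop_eq_getElem_cons (i := k+1) (by omega)]

theorem pvB_char (n : Int) (a : List Int) : is_sort_correct_alt n a = true ↔ pvPc n a := by
  unfold is_sort_correct_alt
  rw [pvBloop_iff]
  constructor
  · intro h L x y R hd hb
    have hlen : a.length = L.length + (R.length + 2) := by
      rw [hd]; simp [List.length_append]
    have hmem : ((L.length : Nat) : Int) ∈ PySem.List.pyRange 0 ((a.length : Int) - 1) 1 := by
      rw [PySem.List.mem_pyRange_one]; omega
    have g1 : PySem.List.pyGetD a ((L.length : Nat) : Int) 0 = x := by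
      rw [hd]; exact pv_getD_append L (y :: R) x 0
    have g2 : PySem.List.pyGetD a (((L.length : Nat) : Int) + 1) 0 = y := by
      have e1 : ((L.length : Nat) : Int) + 1 = (((L ++ [x]).length : Nat) : Int) := by
        simp
      rw [hd, e1, show L ++ x :: y :: R = (L ++ [x]) ++ y :: R by simp]
      exact pv_getD_append (L ++ [x]) R y 0
    have hi := h ((L.length : Nat) : Int) hmem
    rw [g1, g2] at hi
    have hn := hi hb
    unfold pvPr
    by_cases hxy : y ≤ x
    · rw [if_pos hxy] at hn ⊢
      rw [hd] at hn
      rw [pvRank_dec L (y :: R) x] at hn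
      exact hn
    · rw [if_neg hxy] at hn ⊢
      have e1 : ((L.length : Nat) : Int) + 1 = (((L ++ [x]).length : Nat) : Int) := by
        simp
      rw [hd, e1, show L ++ x :: y :: R = (L ++ [x]) ++ y :: R by simp] at hn
      rw [pvRank_dec (L ++ [x]) R y] at hn
      exact hn
  · intro h i hi hbad
    rw [PySem.List.mem_pyRange_one] at hi
    obtain ⟨h0, h1⟩ := hi
    have hki : ((i.toNat : Nat) : Int) = i := Int.toNat_of_nonneg h0
    have hlenk : i.toNat + 1 < a.length := by omega
    have hd := pv_decomp a i.toNat hlenk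
    have hlt : (a.take i.toNat).length = i.toNat := by
      simp [List.length_take]; omega
    have g1 : PySem.List.pyGetD a i 0 = a[i.toNat] := by
      have e : PySem.List.pyGetD a i 0 = PySem.List.pyGetD a ((i.toNat : Nat) : Int) 0 := by
        rw [hki]
      rw [e, PySem.List.pyGetD_natCast]
      exact List.getD_eq_getElem a 0 (by omega)
    have g2 : PySem.List.pyGetD a (i + 1) 0 = a[i.toNat + 1] := by
      have e : PySem.List.pyGetD a (i + 1) 0 = PySem.List.pyGetD a ((i.toNat + 1 : Nat) : Int) 0 := by
        rw [show ((i.toNat + 1 : Nat) : Int) = i + 1 by push_cast; omega]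
      rw [e, PySem.List.pyGetD_natCast]
      exact List.getD_eq_getElem a 0 (by omega)
    rw [g1, g2] at hbad ⊢
    have hp := h (a.take i.toNat) a[i.toNat] a[i.toNat + 1] (a.drop (i.toNat + 2)) hd hbad
    unfold pvPr at hp
    by_cases hxy : a[i.toNat + 1] ≤ a[i.toNat]
    · rw [if_pos hxy] at hp ⊢
      have hr := pvRank_dec (a.take i.toNat) (a[i.toNat + 1] :: a.drop (i.toNat + 2)) a[i.toNat]
      rw [← hd, hlt, hki] at hr
      rw [hr]
      exact hp
    · rw [if_neg hxy] at hp ⊢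
      have hr := pvRank_dec (a.take i.toNat ++ [a[i.toNat]]) (a.drop (i.toNat + 2)) a[i.toNat + 1]
      rw [show (a.take i.toNat ++ [a[i.toNat]]) ++ a[i.toNat + 1] :: a.drop (i.toNat + 2)
            = a.take i.toNat ++ a[i.toNat] :: a[i.toNat + 1] :: a.drop (i.toNat + 2) by simp] at hr
      rw [← hd] at hr
      have e1 : (((a.take i.toNat ++ [a[i.toNat]]).length : Nat) : Int) = i + 1 := by
        rw [List.length_append, hlt, List.length_singleton]
        push_cast
        omega
      rw [e1] at hr
      rw [hr]
      exact hp


theorem pvPr_insert_R (L : List Int) (x y : Int) (t r : List Int) (mx : Int)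
    (hx : x < mx) (hy : y < mx) :
    pvPr L x y (t ++ mx :: r) = pvPr L x y (t ++ r) + 1 := by
  unfold pvPr
  by_cases hxy : y ≤ x
  · rw [if_pos hxy, if_pos hxy]
    simp only [List.countP_cons, List.countP_append]
    have h1 : decide (x < mx) = true := by simp [hx]
    rw [h1]
    simp only [if_true]
    push_cast
    ring
  · rw [if_neg hxy, if_neg hxy]
    simp only [List.countP_cons, List.countP_append]
    have h1 : decide (y < mx) = true := by simp [hy]
    rw [h1]
    simp only [if_true]
    push_cast
    ring

theorem pvPr_insert_L (l t : List Int) (x y : Int) (R : List Int) (mx : Int)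
    (hx : x ≤ mx) (hy : y ≤ mx) :
    pvPr (l ++ mx :: t) x y R = pvPr (l ++ t) x y R + 1 := by
  unfold pvPr
  by_cases hxy : y ≤ x
  · rw [if_pos hxy, if_pos hxy]
    simp only [List.countP_cons, List.countP_append]
    have h1 : decide (x ≤ mx) = true := by simp [hx]
    rw [h1]
    simp only [if_true]
    push_cast
    ring
  · rw [if_neg hxy, if_neg hxy]
    simp only [List.append_assoc, List.cons_append, List.countP_cons, List.countP_append]
    have h1 : decide (y ≤ mx) = true := by simp [hy]
    rw [h1]
    simp only [if_true]
    push_cast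
    ring

theorem pvPr_zero_R (L : List Int) (mx r0 : Int) (R' : List Int)
    (hL : ∀ e ∈ L, e < mx) (hr : r0 ≤ mx) (hR : ∀ e ∈ R', e ≤ mx) :
    pvPr L mx r0 R' = 0 := by
  unfold pvPr
  rw [if_pos hr]
  have h1 : L.countP (fun e => decide (mx ≤ e)) = 0 :=
    List.countP_eq_zero.mpr (fun e he => by have := hL e he; simp; omega)
  have h2 : (r0 :: R').countP (fun e => decide (mx < e)) = 0 :=
    List.countP_eq_zero.mpr (fun e he => by
      rcases List.mem_cons.mp he with rfl | he'
      · simp; omega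
      · have := hR e he'; simp; omega)
  rw [h1, h2]
  simp

theorem pvPr_zero_L (L' : List Int) (lst mx : Int) (R : List Int)
    (hL : ∀ e ∈ L', e < mx) (hlst : lst < mx) (hR : ∀ e ∈ R, e ≤ mx) :
    pvPr L' lst mx R = 0 := by
  unfold pvPr
  rw [if_neg (by omega)]
  have h1 : (L' ++ [lst]).countP (fun e => decide (mx ≤ e)) = 0 :=
    List.countP_eq_zero.mpr (fun e he => by
      rcases List.mem_append.mp he with he' | he'
      · have := hL e he'; simp; omega
      · rcases List.mem_singleton.mp he' with rfl; simp; omega)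
  have h2 : R.countP (fun e => decide (mx < e)) = 0 :=
    List.countP_eq_zero.mpr (fun e he => by have := hR e he; simp; omega)
  rw [h1, h2]
  simp

theorem pvCore (k : Int) (L R : List Int) (mx : Int)
    (hL : ∀ e ∈ L, e < mx) (hR : ∀ e ∈ R, e ≤ mx)
    (passR : ∀ r0 R', R = r0 :: R' → |mx - r0| ≤ 1)
    (passL : ∀ L' lst, L = L' ++ [lst] → |lst - mx| ≤ 1) :
    (pvPc (k+1) (L ++ mx :: R) ↔ pvPc k (L ++ R)) := by
  constructor
  · intro h L' x y R' hdec hbad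
    rcases List.append_eq_append_iff.mp hdec with ⟨as, hL', hR2⟩ | ⟨cs, hLL, hRR⟩
    · -- the pair lies inside R
      have hx : x ≤ mx := hR x (by rw [hR2]; simp)
      have hy : y ≤ mx := hR y (by rw [hR2]; simp)
      have hbig : L ++ mx :: R = (L ++ mx :: as) ++ x :: y :: R' := by rw [hR2]; simp
      have h1 := h (L ++ mx :: as) x y R' hbig hbad
      have h2 := pvPr_insert_L L as x y R' mx hx hy
      rw [hL']
      omega
    · rcases cs with _ | ⟨c1, cs'⟩
      · -- cs = []: the pair is the front of R
        rw [List.append_nil] at hLL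
        rw [List.nil_append] at hRR
        have hx : x ≤ mx := hR x (by rw [← hRR]; simp)
        have hy : y ≤ mx := hR y (by rw [← hRR]; simp)
        have hbig : L ++ mx :: R = (L ++ mx :: ([] : List Int)) ++ x :: y :: R' := by
          rw [← hRR]; simp
        have h1 := h (L ++ mx :: ([] : List Int)) x y R' hbig hbad
        have h2 := pvPr_insert_L L [] x y R' mx hx hy
        rw [List.append_nil] at h2
        rw [← hLL]
        omega
      · rcases cs' with _ | ⟨c2, cs''⟩
        · -- cs = [c1]: the pair formed by removing mx — never uneven
          injection hRR with e1 e2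
          simp only [List.append_eq, List.nil_append] at e2
          subst e1
          have p1 := passL L' x hLL
          have p2 := passR y R' e2.symm
          have hxmx : x < mx := hL x (by rw [hLL]; simp)
          have hymx : y ≤ mx := hR y (by rw [← e2]; simp)
          rcases lt_abs.mp hbad with h' | h' <;>
            rcases abs_le.mp p1 with ⟨q1, q2⟩ <;> rcases abs_le.mp p2 with ⟨q3, q4⟩ <;> omega
        · -- cs = c1 :: c2 :: cs'': the pair lies inside L
          injection hRR with e1 e2
          injection e2 with e2 e3
          simp only [List.append_eq] at e3
          subst e1
          subst e2
          have hx : x < mx := hL x (by rw [hLL]; simp)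
          have hy : y < mx := hL y (by rw [hLL]; simp)
          have hbig : L ++ mx :: R = L' ++ x :: y :: (cs'' ++ mx :: R) := by rw [hLL]; simp
          have h1 := h L' x y (cs'' ++ mx :: R) hbig hbad
          have h2 := pvPr_insert_R L' x y cs'' R mx hx hy
          rw [e3]
          omega
  · intro h L' x y R' hdec hbad
    rcases List.append_eq_append_iff.mp hdec with ⟨as, hL', hR2⟩ | ⟨cs, hLL, hRR⟩
    · rcases as with _ | ⟨a1, as'⟩
      · -- as = []: the checked pair (mx, head of R) — passes, contradiction
        rw [List.nil_append] at hR2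
        injection hR2 with e1 e2
        subst e1
        have p2 := passR y R' e2
        rcases lt_abs.mp hbad with h' | h' <;> rcases abs_le.mp p2 with ⟨q3, q4⟩ <;> omega
      · -- as = a1 :: as': a1 = mx, the pair lies inside R
        injection hR2 with e1 e2
        subst e1
        have hx : x ≤ mx := hR x (by rw [e2]; simp)
        have hy : y ≤ mx := hR y (by rw [e2]; simp)
        have h1 := h (L ++ as') x y R' (by rw [e2]; simp) hbad
        have h2 := pvPr_insert_L L as' x y R' mx hx hy
        rw [hL']
        omega
    · rcases cs with _ | ⟨c1, cs'⟩
      · -- cs = []: again the checked pair (mx, head of R)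
        rw [List.append_nil] at hLL
        rw [List.nil_append] at hRR
        injection hRR with e1 e2
        subst e1
        have p2 := passR y R' e2.symm
        rcases lt_abs.mp hbad with h' | h' <;> rcases abs_le.mp p2 with ⟨q3, q4⟩ <;> omega
      · rcases cs' with _ | ⟨c2, cs''⟩
        · -- cs = [c1]: the checked pair (last of L, mx) — passes, contradiction
          injection hRR with e1 e2
          injection e2 with e2 e3
          subst e1
          subst e2
          have p1 := passL L' x hLL
          rcases lt_abs.mp hbad with h' | h' <;> rcases abs_le.mp p1 with ⟨q1, q2⟩ <;> omega
        · -- the pair lies inside L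
          injection hRR with e1 e2
          injection e2 with e2 e3
          simp only [List.append_eq] at e3
          subst e1
          subst e2
          have hx : x < mx := hL x (by rw [hLL]; simp)
          have hy : y < mx := hL y (by rw [hLL]; simp)
          have h1 := h L' x y (cs'' ++ R) (by rw [hLL]; simp) hbad
          have h2 := pvPr_insert_R L' x y cs'' R mx hx hy
          rw [e3]
          omega

theorem pvA_overflow (k : Nat) : ∀ a : List Int, a.length < k → pvAloop k a = false := by
  induction k with
  | zero => intro a h; exact absurd h (Nat.not_lt_zero _)
  | succ k ih =>
    intro a h
    simp only [pvAloop]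
    cases hmx : PySem.List.max? a (fun x => x) with
    | none => rfl
    | some mx =>
      cases hp : PySem.List.index? a mx with
      | none => simp only [hp]
      | some p =>
        simp only [hp]
        split_ifs with h1 h2
        · rfl
        · rfl
        · cases hpop : PySem.List.pop? a ((p : Nat) : Int) with
          | none => rfl
          | some r =>
            have hlen := PySem.List.length_of_pop?_eq_some a hpop
            exact ih r.2 (by omega)

theorem pvPr_lt_len (L : List Int) (x y : Int) (R : List Int) :
    pvPr L x y R < ((L.length : Int) + (R.length : Int) + 2) := by
  unfold pvPr
  split_ifs
  · have c1 : L.countP (fun e => decide (x ≤ e)) ≤ L.length := List.countP_le_length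
    have c2 : (y :: R).countP (fun e => decide (x < e)) ≤ (y :: R).length := List.countP_le_length
    rw [List.length_cons] at c2
    omega
  · have c1 : (L ++ [x]).countP (fun e => decide (y ≤ e)) ≤ (L ++ [x]).length :=
      List.countP_le_length
    have c2 : R.countP (fun e => decide (y < e)) ≤ R.length := List.countP_le_length
    rw [List.length_append, List.length_singleton] at c1
    omega

theorem pvA_char (k : Nat) (a : List Int) (hk : k ≤ a.length) :
    pvAloop k a = true ↔ pvPc (k : Int) a := by
  induction k generalizing a with
  | zero =>
    constructor
    · intro _ L x y R hd hb
      have := pvPr_nonneg L x y R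
      omega
    · intro _; rfl
  | succ k ih =>
    obtain ⟨mx, hmx⟩ : ∃ mx, PySem.List.max? a (fun x => x) = some mx := by
      cases hm : PySem.List.max? a (fun x => x) with
      | none =>
        rw [PySem.List.max?_eq_none_iff] at hm
        subst hm; simp at hk
      | some m => exact ⟨m, rfl⟩
    have hmem := PySem.List.max?_mem hmx
    have hmax : ∀ e ∈ a, e ≤ mx := PySem.List.max?_isMax hmx
    obtain ⟨p, hp⟩ : ∃ p, PySem.List.index? a mx = some p := by
      cases hq : PySem.List.index? a mx with
      | none => rw [PySem.List.index?_eq_none_iff] at hq; exact absurd hmem hq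
      | some q => exact ⟨q, rfl⟩
    obtain ⟨L, R, hd, hlen, hnot⟩ := (PySem.List.index?_eq_some_iff a mx p).mp hp
    subst hd
    subst hlen
    have hL : ∀ e ∈ L, e < mx := fun e he =>
      lt_of_le_of_ne (hmax e (by simp [he])) (fun h => hnot (h ▸ he))
    have hR : ∀ e ∈ R, e ≤ mx := fun e he => hmax e (by simp [he])
    have hlena : (L ++ mx :: R).length = L.length + R.length + 1 := by
      rw [List.length_append, List.length_cons]
      omega
    have hg0 : PySem.List.pyGetD (L ++ mx :: R) ((L.length : Nat) : Int) 0 = mx :=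
      pv_getD_append L R mx 0
    simp only [pvAloop, hmx, hp]
    by_cases hc1 : ((L.length : Nat) : Int) + 1 ≠ ((L ++ mx :: R).length : Int) ∧
        1 < |PySem.List.pyGetD (L ++ mx :: R) ((L.length : Nat) : Int) 0 -
              PySem.List.pyGetD (L ++ mx :: R) (((L.length : Nat) : Int) + 1) 0|
    · rw [if_pos hc1]
      obtain ⟨hne, hbad⟩ := hc1
      rcases R with _ | ⟨r0, R'⟩
      · exfalso; apply hne; simp
      · have hg1 : PySem.List.pyGetD (L ++ mx :: r0 :: R') (((L.length : Nat) : Int) + 1) 0 = r0 := by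
          have e1 : ((L.length : Nat) : Int) + 1 = (((L ++ [mx]).length : Nat) : Int) := by simp
          rw [e1, show L ++ mx :: r0 :: R' = (L ++ [mx]) ++ r0 :: R' by simp]
          exact pv_getD_append (L ++ [mx]) R' r0 0
        rw [hg0, hg1] at hbad
        constructor
        · intro hF; exact absurd hF (by simp)
        · intro hP
          exfalso
          have h1 := hP L mx r0 R' rfl hbad
          have h2 := pvPr_zero_R L mx r0 R' hL
            (hR r0 (by simp)) (fun e he => hR e (by simp [he]))
          rw [h2] at h1
          push_cast at h1
          omega
    · rw [if_neg hc1]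
      have passR : ∀ r0 R', R = r0 :: R' → |mx - r0| ≤ 1 := by
        intro r0 R' hR3
        subst hR3
        by_contra hgt
        apply hc1
        constructor
        · have hlen2 : (L ++ mx :: r0 :: R').length = L.length + R'.length + 2 := by
            rw [List.length_append, List.length_cons, List.length_cons]; omega
          intro hl
          rw [hlen2] at hl
          push_cast at hl
          omega
        · have hg1 : PySem.List.pyGetD (L ++ mx :: r0 :: R') (((L.length : Nat) : Int) + 1) 0 = r0 := by
            have e1 : ((L.length : Nat) : Int) + 1 = (((L ++ [mx]).length : Nat) : Int) := by simp
            rw [e1, show L ++ mx :: r0 :: R' = (L ++ [mx]) ++ r0 :: R' by simp]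
            exact pv_getD_append (L ++ [mx]) R' r0 0
          rw [hg0, hg1]
          omega
      by_cases hc2 : ((L.length : Nat) : Int) ≠ 0 ∧
          1 < |PySem.List.pyGetD (L ++ mx :: R) ((L.length : Nat) : Int) 0 -
                PySem.List.pyGetD (L ++ mx :: R) (((L.length : Nat) : Int) - 1) 0|
      · rw [if_pos hc2]
        obtain ⟨hne, hbad⟩ := hc2
        rcases List.eq_nil_or_concat L with rfl | ⟨L', lst, hLL⟩
        · exfalso; exact hne (by simp)
        rw [List.concat_eq_append] at hLL
        subst hLL
        have hLlen : (L' ++ [lst]).length = L'.length + 1 := by simp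
        have hg2 : PySem.List.pyGetD ((L' ++ [lst]) ++ mx :: R) ((((L' ++ [lst]).length : Nat) : Int) - 1) 0 = lst := by
          have e1 : (((L' ++ [lst]).length : Nat) : Int) - 1 = ((L'.length : Nat) : Int) := by
            rw [hLlen]; push_cast; ring
          rw [e1, show (L' ++ [lst]) ++ mx :: R = L' ++ lst :: (mx :: R) by simp]
          exact pv_getD_append L' (mx :: R) lst 0
        rw [hg0, hg2] at hbad
        constructor
        · intro hF; exact absurd hF (by simp)
        · intro hP
          exfalso
          have hdec : (L' ++ [lst]) ++ mx :: R = L' ++ lst :: mx :: R := by simp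
          have h1 := hP L' lst mx R hdec (by rwa [abs_sub_comm] at hbad)
          have h2 := pvPr_zero_L L' lst mx R (fun e he => hL e (by simp [he]))
            (hL lst (by simp)) hR
          rw [h2] at h1
          push_cast at h1
          omega
      · rw [if_neg hc2]
        have passL : ∀ L' lst, L = L' ++ [lst] → |lst - mx| ≤ 1 := by
          intro L' lst hLL
          subst hLL
          by_contra hgt
          apply hc2
          constructor
          · intro hl; simp at hl; omega
          · have hLlen : (L' ++ [lst]).length = L'.length + 1 := by simp
            have hg2 : PySem.List.pyGetD ((L' ++ [lst]) ++ mx :: R) ((((L' ++ [lst]).length : Nat) : Int) - 1) 0 = lst := by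
              have e1 : (((L' ++ [lst]).length : Nat) : Int) - 1 = ((L'.length : Nat) : Int) := by
                rw [hLlen]; push_cast; ring
              rw [e1, show (L' ++ [lst]) ++ mx :: R = L' ++ lst :: (mx :: R) by simp]
              exact pv_getD_append L' (mx :: R) lst 0
            rw [hg0, hg2]
            rw [abs_sub_comm] at hgt
            omega
        have hlt : L.length < (L ++ mx :: R).length := by rw [hlena]; omega
        have e1 : (L ++ mx :: R)[L.length]'hlt = mx := by
          rw [List.getElem_append_right (Nat.le_refl L.length)]
          simp
        have e2 : (L ++ mx :: R).eraseIdx L.length = L ++ R := by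
          rw [List.eraseIdx_append_of_length_le (Nat.le_refl L.length)]
          simp
        have hpop : PySem.List.pop? (L ++ mx :: R) ((L.length : Nat) : Int) = some (mx, L ++ R) := by
          rw [PySem.List.pop?_natCast _ L.length hlt, e1, e2]
        rw [hpop]
        have hklen : k ≤ (L ++ R).length := by
          rw [List.length_append]
          rw [hlena] at hk
          omega
        rw [ih (L ++ R) hklen]
        have hcore := pvCore (k : Int) L R mx hL hR passR passL
        push_cast
        exact hcore.symm


-- ===== VERDICT (by name: the statement is the Claim_ definition above) =====
theorem is_sort_correct_spec : Claim_equal_is_sort_correct := by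
  intro n a _ hpre
  unfold Spec_is_sort_correct is_sort_correct
  unfold Pre_is_sort_correct at hpre
  by_cases hn : n ≤ (a.length : Int)
  · have h1 := pvA_char n.toNat a (by omega)
    have h2 := (pvB_char n a).trans (pvPc_toNat n a).symm
    cases hA : pvAloop n.toNat a <;> cases hB : is_sort_correct_alt n a <;> simp_all
  · have hchain := hpre.resolve_left hn
    have hA : pvAloop n.toNat a = false := pvA_overflow n.toNat a (by omega)
    have hB : is_sort_correct_alt n a = false := by
      cases hB : is_sort_correct_alt n a
      · rfl
      · exfalso
        have hpc := (pvB_char n a).mp hB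
        rw [List.isChain_iff_getElem] at hchain
        push Not at hchain
        obtain ⟨i, hi, hbad⟩ := hchain
        have hd := pv_decomp a i hi
        have h1 := hpc (a.take i) a[i] a[i+1] (a.drop (i+2)) hd (by omega)
        have h2 := pvPr_lt_len (a.take i) a[i] a[i+1] (a.drop (i+2))
        have l1 : (a.take i).length = i := by rw [List.length_take]; omega
        have l2 : (a.drop (i+2)).length = a.length - (i+2) := by rw [List.length_drop]
        omega
    rw [hA, hB]
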